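-- pv_equiv track=rewrite | github.com/stully18/SchoolWork | Assignment 7 Q4.py | factor3
-- ===== SOURCE A (Python) =====
-- def factor3(n):
--     factors = []
--     for a in range(1, n+1):
--         for b in range(1, n + 1):
--             for c in range(1, n + 1):
--                 if a*b*c == n:
--                     factors.append((a,b,c))
--     return factors
-- ===== SOURCE B (Python) =====
-- def factor3(n):
--     # Stage 1: compute the divisor list once; stage 2: a comprehension over
--     # divisors a of n and divisors b of n//a, with c = (n//a)//b determined.
--     def divisors(m):
--         return [d for d in range(1, m + 1) if m % d == 0]
--     return [(a, b, (n // a) // b) for a in divisors(n) for b in divisors(n // a)]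
-- ===== Notes on version B (the rewrite author's own statement) =====
-- stated objective: faster
-- what changed: A tests all n^3 triples in three nested loops; B first builds divisor lists (a filter pass), then produces the result as a flat comprehension over divisors a of n and b of n//a with c = (n//a)//b computed directly, no appends and no triple scan.
import Mathlib
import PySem

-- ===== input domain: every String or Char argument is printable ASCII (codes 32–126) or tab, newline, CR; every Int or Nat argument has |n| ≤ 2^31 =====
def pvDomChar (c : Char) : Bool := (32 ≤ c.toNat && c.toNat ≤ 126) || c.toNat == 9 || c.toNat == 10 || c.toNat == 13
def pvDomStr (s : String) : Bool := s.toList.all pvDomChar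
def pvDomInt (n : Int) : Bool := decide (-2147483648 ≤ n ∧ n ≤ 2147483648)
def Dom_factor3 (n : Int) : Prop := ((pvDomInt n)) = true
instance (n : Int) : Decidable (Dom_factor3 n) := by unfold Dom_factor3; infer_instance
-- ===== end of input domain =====

-- B replaces A's exhaustive triple scan by a divisor-list pass and a flat comprehension over divisor pairs.

-- ===== PORT A =====
def factor3 (n : Int) : List (List Int) :=
  (PySem.List.pyRange 1 (n + 1) 1).foldl (fun factors a =>
    (PySem.List.pyRange 1 (n + 1) 1).foldl (fun factors b =>
      (PySem.List.pyRange 1 (n + 1) 1).foldl (fun factors c =>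
        if a * b * c == n then factors ++ [[a, b, c]] else factors) factors) factors) []

-- ===== PORT B =====
-- helper 'divisors' of Source B: the list comprehension is a filter of the range
def pvDivisors (m : Int) : List Int :=
  (PySem.List.pyRange 1 (m + 1) 1).filter (fun d => PySem.Int.mod m d == 0)

def factor3_alt (n : Int) : List (List Int) :=
  (pvDivisors n).flatMap (fun a =>
    (pvDivisors (PySem.Int.floordiv n a)).map (fun b =>
      [a, b, PySem.Int.floordiv (PySem.Int.floordiv n a) b]))

-- ===== PRECONDITION & SPEC =====
def Spec_factor3 (n : Int) (out : List (List Int)) : Prop := out = factor3_alt n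
instance (n : Int) (out : List (List Int)) : Decidable (Spec_factor3 n out) := by unfold Spec_factor3; infer_instance

-- ===== CLAIM (what is proved, stated in full; the proofs are below) =====
def Claim_equal_factor3 : Prop := ∀ (n : Int), Dom_factor3 n → Spec_factor3 n (factor3 n)

-- ===== LEMMAS AND PROOFS =====

-- 'for x: if p x: out.append([f x])' as flatMap vs filter+map
theorem flatMap_if_singleton {α β : Type} (p : α → Prop) [DecidablePred p] (f : α → β)
    (l : List α) :
    l.flatMap (fun x => if p x then [f x] else []) = (l.filter (fun x => decide (p x))).map f := by
  induction l with
  | nil => rfl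
  | cons x t ih =>
      by_cases h : p x <;> simp [List.flatMap_cons, List.filter_cons, h, ih]

-- flatMap over a filtered list = flatMap over the list with an if guard
theorem flatMap_filter_eq_if {α β : Type} (p : α → Bool) (f : α → List β) (l : List α) :
    (l.filter p).flatMap f = l.flatMap (fun x => if p x then f x else []) := by
  induction l with
  | nil => rfl
  | cons x t ih =>
      by_cases h : p x = true <;> simp [List.filter_cons, h, ih]

-- filtering a range by a predicate that holds exactly at c0 keeps exactly [c0]
theorem filter_pyRange_eq_singleton (lo hi : Int) (p : Int → Bool) (c0 : Int)
    (h1 : lo ≤ c0) (h2 : c0 < hi) (hp : p c0 = true)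
    (huniq : ∀ x, lo ≤ x → x < hi → p x = true → x = c0) :
    (PySem.List.pyRange lo hi 1).filter p = [c0] := by
  have hsplit1 : PySem.List.pyRange lo hi 1 =
      PySem.List.pyRange lo c0 1 ++ PySem.List.pyRange c0 hi 1 :=
    PySem.List.pyRange_one_append lo c0 hi h1 (le_of_lt h2)
  have hsplit2 : PySem.List.pyRange c0 hi 1 =
      PySem.List.pyRange c0 (c0 + 1) 1 ++ PySem.List.pyRange (c0 + 1) hi 1 :=
    PySem.List.pyRange_one_append c0 (c0 + 1) hi (by omega) (by omega)
  have hleft : (PySem.List.pyRange lo c0 1).filter p = [] := by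
    rw [List.filter_eq_nil_iff]
    intro x hx
    rw [PySem.List.mem_pyRange_one] at hx
    intro hpx
    have := huniq x hx.1 (by omega) hpx
    omega
  have hright : (PySem.List.pyRange (c0 + 1) hi 1).filter p = [] := by
    rw [List.filter_eq_nil_iff]
    intro x hx
    rw [PySem.List.mem_pyRange_one] at hx
    intro hpx
    have := huniq x (by omega) hx.2 hpx
    omega
  rw [hsplit1, hsplit2, List.filter_append, List.filter_append, hleft, hright,
    PySem.List.pyRange_one_singleton, List.filter_cons, List.filter_nil]
  simp [hp]

-- the innermost c-loop of A, as a filter: at most one c fits, namely n / (a*b) when a*b ∣ n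
theorem inner_filter_eq (n a b : Int) (ha : 1 ≤ a) (hb : 1 ≤ b) (hn : 1 ≤ n) :
    (PySem.List.pyRange 1 (n + 1) 1).filter (fun c => a * b * c == n) =
      if a * b ∣ n then [n / (a * b)] else [] := by
  have hab : 0 < a * b := by positivity
  split_ifs with hdvd
  · have hc : n / (a * b) * (a * b) = n := Int.ediv_mul_cancel hdvd
    have hcp : 0 < n / (a * b) := by
      by_contra h
      push_neg at h
      nlinarith
    have hcle : n / (a * b) ≤ n := by nlinarith
    apply filter_pyRange_eq_singleton _ _ _ _ hcp (by omega)
    · simp only [beq_iff_eq]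
      · nlinarith
    · intro x _ _ hx
      simp only [beq_iff_eq] at hx
      have : a * b * x = a * b * (n / (a * b)) := by nlinarith
      exact mul_left_cancel₀ (by positivity) this
  · rw [List.filter_eq_nil_iff]
    intro x _ hx
    simp only [beq_iff_eq] at hx
    exact hdvd ⟨x, hx.symm⟩

-- the b- and c-loops of A for one fixed a equal B's guarded body for that a
theorem point_eq (n a : Int) (ha1 : 1 ≤ a) (ha2 : a ≤ n) :
    (PySem.List.pyRange 1 (n + 1) 1).flatMap (fun b =>
        ((PySem.List.pyRange 1 (n + 1) 1).filter (fun c => a * b * c == n)).map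
          (fun c => [a, b, c])) =
      if PySem.Int.mod n a == 0 then
        (pvDivisors (PySem.Int.floordiv n a)).map
          (fun b => [a, b, PySem.Int.floordiv (PySem.Int.floordiv n a) b])
      else [] := by
  have hn : 1 ≤ n := le_trans ha1 ha2
  have ha0 : (0 : Int) < a := ha1
  have hmodiff : (PySem.Int.mod n a == 0) = decide (a ∣ n) := by
    rcases PySem.Int.mod_eq_zero_iff_dvd n a with ⟨h1, h2⟩
    by_cases h : a ∣ n <;> simp [h, h2] <;> omega
  by_cases hdvd : a ∣ n
  · -- a divides n; write m = n / a
    have hfd : PySem.Int.floordiv n a = n / a := PySem.Int.floordiv_eq_ediv_of_pos ha0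
    set m := n / a with hm
    have hma : a * m = n := Int.mul_ediv_cancel' hdvd
    have hm1 : 1 ≤ m := by nlinarith
    have hmn : m ≤ n := by nlinarith
    rw [hmodiff]
    simp only [hdvd, decide_true, if_true]
    -- rewrite each inner filter
    have hstep : ∀ b ∈ PySem.List.pyRange 1 (n + 1) 1,
        ((PySem.List.pyRange 1 (n + 1) 1).filter (fun c => a * b * c == n)).map
            (fun c => [a, b, c]) =
          if a * b ∣ n then [[a, b, n / (a * b)]] else [] := by
      intro b hbmem
      rw [PySem.List.mem_pyRange_one] at hbmem
      rw [inner_filter_eq n a b ha1 hbmem.1 hn]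
      split_ifs <;> simp
    rw [List.flatMap_congr hstep]
    -- split the b-range at m + 1
    rw [PySem.List.pyRange_one_append 1 (m + 1) (n + 1) (by omega) (by omega),
      List.flatMap_append]
    have htail : (PySem.List.pyRange (m + 1) (n + 1) 1).flatMap
        (fun b => if a * b ∣ n then [[a, b, n / (a * b)]] else []) = [] := by
      rw [List.flatMap_eq_nil_iff]
      intro b hbmem
      rw [PySem.List.mem_pyRange_one] at hbmem
      have : ¬ a * b ∣ n := by
        intro hd
        have := Int.le_of_dvd (by omega) hd
        nlinarith
      simp [this]
    rw [htail, List.append_nil]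
    have hhead : ∀ b ∈ PySem.List.pyRange 1 (m + 1) 1,
        (if a * b ∣ n then [[a, b, n / (a * b)]] else []) =
          (if b ∣ m then [[a, b, m / b]] else []) := by
      intro b hbmem
      rw [PySem.List.mem_pyRange_one] at hbmem
      have hiff : a * b ∣ n ↔ b ∣ m := by
        rw [← hma]; exact mul_dvd_mul_iff_left (by omega)
      have hq : n / (a * b) = m / b := by
        rw [← hma]; exact Int.mul_ediv_mul_of_pos m b ha0
      simp only [hiff, hq]
    rw [List.flatMap_congr hhead, flatMap_if_singleton (fun b => b ∣ m) (fun b => [a, b, m / b])]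
    rw [hfd]
    unfold pvDivisors
    have hfilter : (PySem.List.pyRange 1 (m + 1) 1).filter (fun b => decide (b ∣ m)) =
        (PySem.List.pyRange 1 (m + 1) 1).filter (fun b => PySem.Int.mod m b == 0) := by
      apply List.filter_congr
      intro b hbmem
      rw [PySem.List.mem_pyRange_one] at hbmem
      rcases PySem.Int.mod_eq_zero_iff_dvd m b with ⟨h1, h2⟩
      by_cases h : b ∣ m <;> simp [h, h2] <;> omega
    rw [hfilter]
    apply List.map_congr_left
    intro b hbmem
    rw [List.mem_filter, PySem.List.mem_pyRange_one] at hbmem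
    rw [PySem.Int.floordiv_eq_ediv_of_pos (by omega : (0:Int) < b)]
  · -- a does not divide n: both sides are empty
    rw [hmodiff]
    simp only [hdvd, decide_false, Bool.false_eq_true, if_false]
    rw [List.flatMap_eq_nil_iff]
    intro b hbmem
    rw [PySem.List.mem_pyRange_one] at hbmem
    rw [inner_filter_eq n a b ha1 hbmem.1 hn]
    have : ¬ a * b ∣ n := fun hd => hdvd (dvd_trans ⟨b, rfl⟩ hd)
    simp [this]

theorem factor3_eq_flat (n : Int) :
    factor3 n = (PySem.List.pyRange 1 (n + 1) 1).flatMap (fun a =>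
      (PySem.List.pyRange 1 (n + 1) 1).flatMap (fun b =>
        ((PySem.List.pyRange 1 (n + 1) 1).filter (fun c => a * b * c == n)).map
          (fun c => [a, b, c]))) := by
  unfold factor3
  have h1 : ∀ (a b : Int) (acc : List (List Int)),
      (PySem.List.pyRange 1 (n + 1) 1).foldl (fun factors c =>
        if a * b * c == n then factors ++ [[a, b, c]] else factors) acc =
      acc ++ ((PySem.List.pyRange 1 (n + 1) 1).filter (fun c => a * b * c == n)).map
        (fun c => [a, b, c]) := fun a b acc =>
    PySem.List.foldl_append_if (fun c => a * b * c == n) (fun c => [a, b, c]) _ acc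
  have h2 : ∀ (a : Int) (acc : List (List Int)),
      (PySem.List.pyRange 1 (n + 1) 1).foldl (fun factors b =>
        (PySem.List.pyRange 1 (n + 1) 1).foldl (fun factors c =>
          if a * b * c == n then factors ++ [[a, b, c]] else factors) factors) acc =
      acc ++ (PySem.List.pyRange 1 (n + 1) 1).flatMap (fun b =>
        ((PySem.List.pyRange 1 (n + 1) 1).filter (fun c => a * b * c == n)).map
          (fun c => [a, b, c])) := by
    intro a acc
    have : (fun (factors : List (List Int)) b =>
        (PySem.List.pyRange 1 (n + 1) 1).foldl (fun factors c =>
          if a * b * c == n then factors ++ [[a, b, c]] else factors) factors) =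
        fun factors b => factors ++
          ((PySem.List.pyRange 1 (n + 1) 1).filter (fun c => a * b * c == n)).map
            (fun c => [a, b, c]) := by
      funext factors b; exact h1 a b factors
    rw [this, PySem.List.foldl_append_eq_flatMap]
  have : (fun (factors : List (List Int)) a =>
      (PySem.List.pyRange 1 (n + 1) 1).foldl (fun factors b =>
        (PySem.List.pyRange 1 (n + 1) 1).foldl (fun factors c =>
          if a * b * c == n then factors ++ [[a, b, c]] else factors) factors) factors) =
      fun factors a => factors ++ (PySem.List.pyRange 1 (n + 1) 1).flatMap (fun b =>
        ((PySem.List.pyRange 1 (n + 1) 1).filter (fun c => a * b * c == n)).map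
          (fun c => [a, b, c])) := by
    funext factors a; exact h2 a factors
  rw [this, PySem.List.foldl_append_eq_flatMap, List.nil_append]

-- B, with the outer divisor filter pushed into an if-guard over the full range
theorem factor3_alt_eq_flat (n : Int) :
    factor3_alt n = (PySem.List.pyRange 1 (n + 1) 1).flatMap (fun a =>
      if PySem.Int.mod n a == 0 then
        (pvDivisors (PySem.Int.floordiv n a)).map
          (fun b => [a, b, PySem.Int.floordiv (PySem.Int.floordiv n a) b])
      else []) := by
  unfold factor3_alt pvDivisors
  rw [flatMap_filter_eq_if]

-- ===== VERDICT (by name: the statement is the Claim_ definition above) =====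
theorem factor3_spec : Claim_equal_factor3 := by
  intro n _
  unfold Spec_factor3
  rw [factor3_eq_flat, factor3_alt_eq_flat]
  apply List.flatMap_congr
  intro a hamem
  rw [PySem.List.mem_pyRange_one] at hamem
  exact point_eq n a hamem.1 (by omega)
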